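-- pv_equiv track=rewrite | github.com/Julesc013/dominium | tools/xstack/testx/tests/test_arbitration_equal_share.py | _share_counts
-- ===== SOURCE A (Python) =====
-- def _share_counts(result: dict) -> dict:
--     out = {}
--     rows = dict(result.get("selected_player_by_region") or {})
--     for peer_id in rows.values():
--         token = str(peer_id).strip()
--         if not token:
--             continue
--         out[token] = int(out.get(token, 0)) + 1
--     return dict((key, out[key]) for key in sorted(out.keys()))
-- ===== SOURCE B (Python) =====
-- from itertools import groupby
--
--
-- def _share_counts(result: dict) -> dict:
--     rows = dict(result.get("selected_player_by_region") or {})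
--     tokens = sorted(t for t in (str(v).strip() for v in rows.values()) if t)
--     return {token: len(list(group)) for token, group in groupby(tokens)}
-- ===== Notes on version B (the rewrite author's own statement) =====
-- stated objective: idiomatic
-- what changed: A accumulates counts in a dict while scanning and then sorts the keys and re-looks each count up; B first builds the sorted list of non-empty stripped tokens and emits (token, run length) per maximal run via itertools.groupby, needing no dict and no final sort of keys.
import Mathlib
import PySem

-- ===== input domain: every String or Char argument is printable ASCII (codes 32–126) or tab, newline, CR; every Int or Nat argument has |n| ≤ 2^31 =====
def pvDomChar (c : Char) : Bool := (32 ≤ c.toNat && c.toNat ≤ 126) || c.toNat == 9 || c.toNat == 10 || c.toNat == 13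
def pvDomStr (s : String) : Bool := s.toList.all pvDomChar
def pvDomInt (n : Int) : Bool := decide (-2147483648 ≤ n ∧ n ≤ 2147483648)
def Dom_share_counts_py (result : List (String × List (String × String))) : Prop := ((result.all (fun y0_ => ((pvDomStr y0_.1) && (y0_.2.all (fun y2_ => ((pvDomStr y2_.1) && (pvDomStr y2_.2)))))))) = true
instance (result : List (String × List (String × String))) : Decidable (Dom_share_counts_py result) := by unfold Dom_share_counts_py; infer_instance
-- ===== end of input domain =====

-- B replaces A's hash-accumulate-then-sort-keys pass by sort-the-tokens-then-group-consecutive-runs (itertools.groupby); objective: idiomatic, same cost.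

-- ===== PORT A =====
def share_counts_py (result : List (String × List (String × String))) : List (String × Int) :=
  let rows := PySem.Dict.ofList (((PySem.Dict.mk result).get? "selected_player_by_region").getD [])
  let out := rows.values.foldl
    (fun (out : PySem.Dict String Int) peer_id =>
      let token := PySem.Str.strip peer_id   -- str(peer_id) is the identity on a str
      if token = "" then out
      else out.insert token (out.getD token 0 + 1))
    PySem.Dict.empty
  (PySem.List.sorted out.keys (fun k => k) false).map (fun key => (key, out.getD key 0))
  -- out[key]: key ranges over out.keys, so the lookup always succeeds; getD 0 is exact here

-- ===== PORT B =====
-- itertools.groupby over the sorted token list: each maximal run of equal tokens becomes one (token, run length) item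
def groupRuns : List String → List (String × Int)
  | [] => []
  | x :: xs =>
      (x, 1 + (xs.takeWhile (fun y => y == x)).length) ::
        groupRuns (xs.dropWhile (fun y => y == x))
termination_by l => l.length
decreasing_by
  simp only [List.length_cons]
  exact Nat.lt_succ_of_le (List.length_dropWhile_le _ _)

def share_counts_py_alt (result : List (String × List (String × String))) : List (String × Int) :=
  let rows := PySem.Dict.ofList (((PySem.Dict.mk result).get? "selected_player_by_region").getD [])
  let tokens := PySem.List.sorted
    ((rows.values.map PySem.Str.strip).filter (fun t => t ≠ "")) (fun t => t) false
  groupRuns tokens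

-- ===== PRECONDITION & SPEC =====
def Spec_share_counts_py (result : List (String × List (String × String))) (out : List (String × Int)) : Prop := out = share_counts_py_alt result
instance (result : List (String × List (String × String))) (out : List (String × Int)) : Decidable (Spec_share_counts_py result out) := by unfold Spec_share_counts_py; infer_instance

-- ===== CLAIM (what is proved, stated in full; the proofs are below) =====
def Claim_equal_share_counts_py : Prop := ∀ (result : List (String × List (String × String))), Dom_share_counts_py result → Spec_share_counts_py result (share_counts_py result)

-- ===== LEMMAS AND PROOFS =====

-- A's loop (strip, skip empties, count) is the counting fold over the stripped, non-empty tokens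
theorem foldA_eq_counter (vs : List String) (d : PySem.Dict String Int) :
    vs.foldl
      (fun (out : PySem.Dict String Int) peer_id =>
        let token := PySem.Str.strip peer_id
        if token = "" then out
        else out.insert token (out.getD token 0 + 1)) d
    = ((vs.map PySem.Str.strip).filter (fun t => t ≠ "")).foldl
        (fun (out : PySem.Dict String Int) t => out.insert t (out.getD t 0 + 1)) d := by
  induction vs generalizing d with
  | nil => rfl
  | cons v vs ih =>
      simp only [List.foldl_cons, List.map_cons, List.filter_cons]
      by_cases h : PySem.Str.strip v = ""
      · simp [h, ih]
      · simp [h, ih]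

-- groupRuns of a ≤-sorted list, against any strictly sorted enumeration u of its distinct elements
theorem groupRuns_char : ∀ (s u : List String), s.Pairwise (· ≤ ·) → u.Pairwise (· < ·) →
    (∀ z, z ∈ u ↔ z ∈ s) → groupRuns s = u.map (fun k => (k, (s.count k : Int))) := by
  intro s
  induction s using groupRuns.induct with
  | case1 =>
      intro u _ _ hmem
      have : u = [] := by
        cases u with
        | nil => rfl
        | cons y ys => exact absurd ((hmem y).mp (by simp)) (by simp)
      simp [this, groupRuns]
  | case2 x xs ih =>
      intro u hs hu hmem
      obtain ⟨y, u', rfl⟩ : ∃ y u', u = y :: u' := by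
        cases u with
        | nil => exact absurd ((hmem x).mpr (by simp)) (by simp)
        | cons y ys => exact ⟨y, ys, rfl⟩
      have hxs_le : ∀ z ∈ xs, x ≤ z := fun z hz => List.rel_of_pairwise_cons hs hz
      have hxley : x ≤ y := by
        rcases List.mem_cons.mp ((hmem y).mp (by simp)) with h | h
        · exact le_of_eq h.symm
        · exact hxs_le y h
      have hxy : x = y := by
        rcases List.mem_cons.mp ((hmem x).mpr (by simp)) with h | h
        · exact h
        · exact absurd (List.rel_of_pairwise_cons hu h) (not_lt.mpr hxley)
      subst hxy
      have hsplit : xs.takeWhile (fun y => y == x) ++ xs.dropWhile (fun y => y == x) = xs :=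
        List.takeWhile_append_dropWhile
      have hrun : ∀ z ∈ xs.takeWhile (fun y => y == x), z = x := by
        intro z hz
        exact eq_of_beq (List.mem_takeWhile_imp (p := fun y => y == x) hz)
      have hrest_pw : (xs.dropWhile (fun y => y == x)).Pairwise (· ≤ ·) :=
        (List.Pairwise.of_cons hs).sublist (List.dropWhile_sublist _)
      have hrest_gt : ∀ z ∈ xs.dropWhile (fun y => y == x), x < z := by
        cases hdw : xs.dropWhile (fun y => y == x) with
        | nil => simp
        | cons h t =>
            intro z hz
            have hph := List.head_dropWhile_not (fun y => y == x) (l := xs) (by simp [hdw])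
            simp only [hdw, List.head_cons] at hph
            have hxh : x < h :=
              lt_of_le_of_ne (hxs_le h ((List.dropWhile_sublist _).mem (hdw ▸ List.mem_cons_self)))
                (Ne.symm (by simpa using hph))
            have hpw : (h :: t).Pairwise (· ≤ ·) := hdw ▸ hrest_pw
            rcases List.mem_cons.mp hz with rfl | hzt
            · exact hxh
            · exact lt_of_lt_of_le hxh (List.rel_of_pairwise_cons hpw hzt)
      have hmem' : ∀ z, z ∈ u' ↔ z ∈ xs.dropWhile (fun y => y == x) := by
        intro z
        constructor
        · intro hz
          have hxz : x < z := List.rel_of_pairwise_cons hu hz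
          rcases List.mem_cons.mp ((hmem z).mp (List.mem_cons_of_mem _ hz)) with h | h
          · exact absurd h (show z ≠ x from fun e => lt_irrefl x (e ▸ hxz))
          · rcases List.mem_append.mp (hsplit ▸ h) with h2 | h2
            · exact absurd (hrun z h2) (show z ≠ x from fun e => lt_irrefl x (e ▸ hxz))
            · exact h2
        · intro hz
          have hxz : x < z := hrest_gt z hz
          have : z ∈ x :: xs := List.mem_cons_of_mem _ ((List.dropWhile_sublist _).mem hz)
          rcases List.mem_cons.mp ((hmem z).mpr this) with h | h
          · exact absurd h (show z ≠ x from fun e => lt_irrefl x (e ▸ hxz))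
          · exact h
      have hrec := ih u' hrest_pw (List.Pairwise.of_cons hu) hmem'
      rw [groupRuns, hrec]
      have hcx : (x :: xs).count x = 1 + (xs.takeWhile (fun y => y == x)).length := by
        rw [List.count_cons_self]
        conv_lhs => rw [← hsplit]
        rw [List.count_append]
        have h1 : (xs.takeWhile (fun y => y == x)).count x = (xs.takeWhile (fun y => y == x)).length :=
          List.count_eq_length.mpr (fun b hb => (hrun b hb).symm)
        have h2 : (xs.dropWhile (fun y => y == x)).count x = 0 :=
          List.count_eq_zero.mpr (fun h => lt_irrefl x (hrest_gt x h))
        omega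
      simp only [List.map_cons]
      congr 1
      · rw [hcx]; push_cast; rfl
      · apply List.map_congr_left
        intro k hk
        have hxk : x < k := List.rel_of_pairwise_cons hu hk
        have : (x :: xs).count k = (xs.dropWhile (fun y => y == x)).count k := by
          have hkx : k ≠ x := fun e => lt_irrefl x (e ▸ hxk)
          rw [List.count_cons_of_ne (Ne.symm hkx)]
          conv_lhs => rw [← hsplit]
          rw [List.count_append, List.count_eq_zero.mpr (fun h => hkx (hrun k h)), Nat.zero_add]
        rw [this]

-- ===== VERDICT (by name: the statement is the Claim_ definition above) =====
theorem share_counts_py_spec : Claim_equal_share_counts_py := by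
  intro result _
  unfold Spec_share_counts_py share_counts_py share_counts_py_alt
  set vs := (PySem.Dict.ofList (((PySem.Dict.mk result).get? "selected_player_by_region").getD [])).values with hvs
  set ts := (vs.map PySem.Str.strip).filter (fun t => t ≠ "") with hts
  simp only [foldA_eq_counter, PySem.Dict.foldl_insert_getD_add_one_eq_counter,
    PySem.Dict.keys_counter]
  rw [groupRuns_char (PySem.List.sorted ts (fun t => t) false)
        (PySem.List.sorted (PySem.Set.ofList ts) (fun k => k) false)
        (PySem.List.sorted_pairwise ts (fun t => t))
        (PySem.List.sorted_ofList_pairwise_lt ts)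
        (by intro z; rw [PySem.List.mem_sorted, PySem.List.mem_sorted, PySem.Set.mem_ofList])]
  apply List.map_congr_left
  intro k _
  rw [PySem.Dict.getD_counter, (PySem.List.sorted_perm ts (fun t => t) false).count_eq k]
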